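-- pv_equiv track=rewrite | github.com/michaelHarperCode/past-coding-projects | python-projects/codingbat.py | has22
-- ===== SOURCE A (Python) =====
-- def has22(nums):
--   i = 0
--   hasTwoTwos = False
--   while i < len(nums) - 1:
--     if nums[i] == 2 and nums[i+1] == 2:
--       hasTwoTwos = True
--       return hasTwoTwos
--     i = i + 1
--   return hasTwoTwos
-- ===== SOURCE B (Python) =====
-- def has22(nums):
--   positions = [i for i, x in enumerate(nums) if x == 2]
--   return any(b - a == 1 for a, b in zip(positions, positions[1:]))
-- ===== Notes on version B (the rewrite author's own statement) =====
-- stated objective: alternative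
-- what changed: Replaces the index-based sliding-window while loop with an index-collection pass (positions of 2s via enumerate) followed by a gap-check over consecutive collected positions.
import Mathlib
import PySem

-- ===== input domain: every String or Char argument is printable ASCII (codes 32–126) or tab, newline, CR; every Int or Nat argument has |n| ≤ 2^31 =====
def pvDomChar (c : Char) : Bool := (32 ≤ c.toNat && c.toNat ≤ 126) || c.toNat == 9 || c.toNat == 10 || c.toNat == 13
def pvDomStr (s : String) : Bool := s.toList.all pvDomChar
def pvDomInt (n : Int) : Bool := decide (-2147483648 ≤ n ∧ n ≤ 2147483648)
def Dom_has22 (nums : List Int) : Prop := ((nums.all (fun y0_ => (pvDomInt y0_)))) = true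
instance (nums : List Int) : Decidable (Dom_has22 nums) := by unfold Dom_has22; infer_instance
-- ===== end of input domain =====

-- B replaces A's index-based sliding-window while loop by an index-collection pass
-- (positions of the 2s) plus a gap check over consecutive collected positions (alternative decomposition).

-- ===== PORT A =====
-- while i < len(nums) - 1: … i = i + 1   (index i : Nat; guard stated over Int exactly as Python computes it)
def has22Loop (nums : List Int) (i : Nat) : Bool :=
  if h : (i : Int) < (nums.length : Int) - 1 then
    if (PySem.List.pyGet? nums (i : Int)).getD 0 = 2 ∧ (PySem.List.pyGet? nums ((i : Int) + 1)).getD 0 = 2 then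
      true
    else
      has22Loop nums (i + 1)
  else false
termination_by nums.length - i
decreasing_by omega

def has22 (nums : List Int) : Bool := has22Loop nums 0

-- ===== PORT B =====
def has22_alt (nums : List Int) : Bool :=
  let positions := ((PySem.List.enumerate nums).filter (fun p => p.2 == 2)).map (fun p => p.1)
  (positions.zip (positions.drop 1)).any (fun p => p.2 - p.1 == 1)

-- ===== PRECONDITION & SPEC =====
def Spec_has22 (nums : List Int) (out : Bool) : Prop := out = has22_alt nums
instance (nums : List Int) (out : Bool) : Decidable (Spec_has22 nums out) := by unfold Spec_has22; infer_instance

-- ===== CLAIM (what is proved, stated in full; the proofs are below) =====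
def Claim_equal_has22 : Prop := ∀ (nums : List Int), Dom_has22 nums → Spec_has22 nums (has22 nums)

-- ===== LEMMAS AND PROOFS =====

-- reference spec: the list has two adjacent 2s
def adjTwo : List Int → Bool
  | a :: b :: t => (a == 2 && b == 2) || adjTwo (b :: t)
  | _ => false

-- positions of the 2s, indices starting at s (proof-side normal form of B's first pass)
def posOf : List Int → Int → List Int
  | [], _ => []
  | x :: t, s => if x == 2 then s :: posOf t (s + 1) else posOf t (s + 1)

lemma posOf_eq (t : List Int) (s : Int) :
    ((PySem.List.enumerate t s).filter (fun p => p.2 == 2)).map (fun p => p.1) = posOf t s := by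
  induction t generalizing s with
  | nil => simp [posOf, PySem.List.enumerate_nil]
  | cons x t ih =>
    simp only [PySem.List.enumerate_cons, List.filter_cons, posOf]
    by_cases hx : x == 2 <;> simp [hx, ih]

lemma posOf_ge (t : List Int) (s q : Int) (hq : q ∈ posOf t s) : s ≤ q := by
  induction t generalizing s with
  | nil => simp [posOf] at hq
  | cons x t ih =>
    simp only [posOf] at hq
    by_cases hx : x == 2
    · simp [hx] at hq
      rcases hq with h | h
      · omega
      · have := ih (s + 1) h; omega
    · simp [hx] at hq
      have := ih (s + 1) hq; omega

-- gap check over the positions list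
def gapChk (ps : List Int) : Bool := (ps.zip (ps.drop 1)).any (fun p => p.2 - p.1 == 1)

lemma gapChk_posOf (t : List Int) (s : Int) : gapChk (posOf t s) = adjTwo t := by
  induction t generalizing s with
  | nil => simp [posOf, gapChk, adjTwo]
  | cons x t ih =>
    by_cases hx : x = 2
    · subst hx
      simp only [posOf, beq_self_eq_true, if_true]
      cases t with
      | nil => simp [posOf, gapChk, adjTwo]
      | cons b t' =>
        by_cases hb : b = 2
        · subst hb
          have h1 : posOf ((2 : Int) :: t') (s + 1) = (s + 1) :: posOf t' (s + 1 + 1) := by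
            simp [posOf]
          simp [gapChk, h1, adjTwo]
        · have hbb : (b == (2 : Int)) = false := by simp [hb]
          have h1 : posOf (b :: t') (s + 1) = posOf t' (s + 1 + 1) := by
            simp [posOf, hbb]
          have ihv := ih (s := s + 1)
          rw [h1] at ihv
          have hadj : adjTwo (2 :: b :: t') = adjTwo (b :: t') := by
            simp [adjTwo, hb]
          rw [hadj, ← ihv]
          rw [h1]
          cases hp : posOf t' (s + 1 + 1) with
          | nil => simp [gapChk]
          | cons q r =>
            have hq : s + 1 + 1 ≤ q := posOf_ge t' (s + 1 + 1) q (by simp [hp])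
            have hne : (q - s == (1 : Int)) = false := by simp; omega
            simp only [gapChk, List.drop, List.zip_cons_cons, List.any_cons, hne,
              Bool.false_or]
    · have hxb : (x == (2 : Int)) = false := by simp [hx]
      simp only [posOf, hxb, Bool.false_eq_true, if_false]
      rw [ih (s := s + 1)]
      cases t with
      | nil => simp [adjTwo]
      | cons b t' => simp [adjTwo, hx]

-- A's loop computes adjTwo on the remaining suffix
lemma has22Loop_eq (nums : List Int) (i : Nat) : has22Loop nums i = adjTwo (nums.drop i) := by
  by_cases h : (i : Int) < (nums.length : Int) - 1
  · have hi1 : i + 1 < nums.length := by omega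
    have hi : i < nums.length := by omega
    have hd : nums.drop i = nums[i] :: nums[i+1] :: nums.drop (i + 2) := by
      rw [List.drop_eq_getElem_cons hi, List.drop_eq_getElem_cons hi1]
    rw [has22Loop, dif_pos h]
    have g1 : (PySem.List.pyGet? nums (i : Int)).getD 0 = nums[i] := by
      rw [PySem.List.pyGet?_natCast, List.getElem?_eq_getElem hi]; rfl
    have g2 : (PySem.List.pyGet? nums ((i : Int) + 1)).getD 0 = nums[i+1] := by
      have : ((i : Int) + 1) = ((i + 1 : Nat) : Int) := by push_cast; ring
      rw [this, PySem.List.pyGet?_natCast, List.getElem?_eq_getElem hi1]; rfl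
    rw [g1, g2, hd]
    by_cases h2 : nums[i] = 2 ∧ nums[i+1] = 2
    · simp [adjTwo, h2.1, h2.2]
    · rw [if_neg h2, has22Loop_eq nums (i + 1)]
      rw [List.drop_eq_getElem_cons hi1]
      have : ¬ (nums[i] == 2 && nums[i+1] == 2) = true := by
        simp only [Bool.and_eq_true, beq_iff_eq]; exact h2
      simp only [adjTwo]
      simp [this]
  · rw [has22Loop, dif_neg h]
    have : nums.length ≤ i + 1 := by omega
    rcases Nat.lt_or_ge i nums.length with hlt | hge
    · have : nums.drop i = [nums[i]] := by
        rw [List.drop_eq_getElem_cons hlt, List.drop_eq_nil_iff.mpr (by omega)]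
      simp [this, adjTwo]
    · simp [List.drop_eq_nil_iff.mpr hge, adjTwo]
termination_by nums.length - i
decreasing_by omega

-- ===== VERDICT (by name: the statement is the Claim_ definition above) =====
theorem has22_spec : Claim_equal_has22 := by
  intro nums _
  unfold Spec_has22 has22 has22_alt
  rw [has22Loop_eq, List.drop_zero, posOf_eq]
  exact (gapChk_posOf nums 0).symm
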